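-- pv_equiv track=rewrite | github.com/MykolaKantsir/web | inventory/utils.py | get_tap_type
-- ===== SOURCE A (Python) =====
-- def get_tap_type(s: list) -> str:
--     l = list(map(lambda x: x.upper(), s))
--     tap_types = {
--         'form': ['DSL', 'FORMING', 'FORM', 'FORMERS', 'FORMER'],
--         'cut': ['DL', 'CUTTING', 'CUT'],
--         'spiral': ['SL', 'SPIRAL']
--     }
--     for k, v in tap_types.items():
--         for i in v:
--             if i in l:
--                 return k
--     return None
-- ===== SOURCE B (Python) =====
-- _CATS = ['form', 'cut', 'spiral']
-- _RANK = {'DSL': 0, 'FORMING': 0, 'FORM': 0, 'FORMERS': 0, 'FORMER': 0,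
--          'DL': 1, 'CUTTING': 1, 'CUT': 1,
--          'SL': 2, 'SPIRAL': 2}
--
-- def get_tap_type(s: list) -> str:
--     l = list(map(lambda x: x.upper(), s))
--     best = None
--     for x in l:
--         r = _RANK.get(x)
--         if r is not None and (best is None or r < best):
--             best = r
--     return None if best is None else _CATS[best]
-- ===== Notes on version B (the rewrite author's own statement) =====
-- stated objective: idiomatic
-- what changed: Instead of scanning the input list once per keyword (10 membership scans in priority order), B builds a keyword-to-priority-rank lookup table and makes a single pass over the input tracking the minimum rank, then maps the rank back to its category.
import Mathlib
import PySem

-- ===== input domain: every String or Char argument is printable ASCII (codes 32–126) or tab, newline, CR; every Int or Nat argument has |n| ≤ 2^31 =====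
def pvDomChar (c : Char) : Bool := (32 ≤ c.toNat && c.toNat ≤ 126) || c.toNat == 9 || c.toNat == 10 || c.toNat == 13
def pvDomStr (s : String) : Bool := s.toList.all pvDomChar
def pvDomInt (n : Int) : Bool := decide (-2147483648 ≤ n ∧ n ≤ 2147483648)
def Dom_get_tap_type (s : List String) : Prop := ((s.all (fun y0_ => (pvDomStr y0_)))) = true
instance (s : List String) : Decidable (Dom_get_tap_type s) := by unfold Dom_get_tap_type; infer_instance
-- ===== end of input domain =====

-- ===== PORT A =====
-- B replaces A's 10 priority-ordered membership scans of the input by a single pass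
-- over the input against a keyword-to-rank lookup table (objective: idiomatic).

set_option maxRecDepth 8192

-- inner 'for i in v: if i in l: return k'
def pvInnerA (l : List String) (k : String) : List String → Option String
  | [] => none
  | i :: rest => if l.contains i then some k else pvInnerA l k rest

-- outer 'for k, v in tap_types.items(): …'
def pvOuterA (l : List String) : List (String × List String) → Option String
  | [] => none
  | (k, v) :: rest =>
    match pvInnerA l k v with
    | some r => some r
    | none => pvOuterA l rest

def pvTapTypes : List (String × List String) :=
  [("form", ["DSL", "FORMING", "FORM", "FORMERS", "FORMER"]),
   ("cut", ["DL", "CUTTING", "CUT"]),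
   ("spiral", ["SL", "SPIRAL"])]

def get_tap_type (s : List String) : Option String :=
  pvOuterA (s.map PySem.Str.upper) pvTapTypes

-- ===== PORT B =====
def pvCats : List String := ["form", "cut", "spiral"]

def pvRank : PySem.Dict String Int :=
  PySem.Dict.ofList
    [("DSL", 0), ("FORMING", 0), ("FORM", 0), ("FORMERS", 0), ("FORMER", 0),
     ("DL", 1), ("CUTTING", 1), ("CUT", 1),
     ("SL", 2), ("SPIRAL", 2)]

-- 'for x in l: r = _RANK.get(x); if r is not None and (best is None or r < best): best = r'
def pvBestB : List String → Option Int → Option Int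
  | [], best => best
  | x :: rest, best =>
    pvBestB rest
      (match PySem.Dict.get? pvRank x, best with
       | some r, none => some r
       | some r, some b => if r < b then some r else some b
       | none, b => b)

def get_tap_type_alt (s : List String) : Option String :=
  let l := s.map PySem.Str.upper
  match pvBestB l none with
  | none => none
  | some r => PySem.List.pyGet? pvCats r   -- _CATS[best]; best ∈ {0,1,2} so always in range

-- ===== PRECONDITION & SPEC =====
def Spec_get_tap_type (s : List String) (out : Option String) : Prop := out = get_tap_type_alt s
instance (s : List String) (out : Option String) : Decidable (Spec_get_tap_type s out) := by unfold Spec_get_tap_type; infer_instance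

-- ===== CLAIM (what is proved, stated in full; the proofs are below) =====
def Claim_equal_get_tap_type : Prop := ∀ (s : List String), Dom_get_tap_type s → Spec_get_tap_type s (get_tap_type s)

-- ===== LEMMAS AND PROOFS =====

-- 'min' on Option Int, shaped like B's loop step (none = "no rank yet")
def pvMinO : Option Int → Option Int → Option Int
  | b, none => b
  | none, some r => some r
  | some bb, some r => if r < bb then some r else some bb

-- minimum rank of the whole list, as a right fold
def pvM : List String → Option Int
  | [] => none
  | x :: rest => pvMinO (PySem.Dict.get? pvRank x) (pvM rest)

theorem pvMinO_some_some (a b : Int) : pvMinO (some a) (some b) = some (min a b) := by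
  simp only [pvMinO]; split_ifs <;> exact congrArg some (by omega)

theorem pvMinO_none_left (x : Option Int) : pvMinO none x = x := by cases x <;> rfl

theorem pvMinO_none_right (x : Option Int) : pvMinO x none = x := rfl

theorem pvMinO_comm (a b : Option Int) : pvMinO a b = pvMinO b a := by
  cases a <;> cases b <;>
    simp only [pvMinO_none_left, pvMinO_none_right, pvMinO_some_some, min_comm]

theorem pvMinO_assoc (a b c : Option Int) :
    pvMinO (pvMinO a b) c = pvMinO a (pvMinO b c) := by
  cases a <;> cases b <;> cases c <;>
    simp only [pvMinO_none_left, pvMinO_none_right, pvMinO_some_some, min_assoc]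

theorem pvBestB_step (r b : Option Int) :
    (match r, b with
     | some r, none => some r
     | some r, some bb => if r < bb then some r else some bb
     | none, b => b) = pvMinO b r := by
  cases r <;> cases b <;> rfl

theorem pvBestB_eq_minO (l : List String) (b : Option Int) :
    pvBestB l b = pvMinO b (pvM l) := by
  induction l generalizing b with
  | nil => cases b <;> rfl
  | cons x rest ih =>
    show pvBestB rest _ = _
    rw [pvBestB_step, ih]
    show _ = pvMinO b (pvMinO (PySem.Dict.get? pvRank x) (pvM rest))
    rw [← pvMinO_assoc, pvMinO_comm b]

def pvIsF (x : String) : Bool :=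
  "DSL" == x || "FORMING" == x || "FORM" == x || "FORMERS" == x || "FORMER" == x
def pvIsC (x : String) : Bool := "DL" == x || "CUTTING" == x || "CUT" == x
def pvIsS (x : String) : Bool := "SL" == x || "SPIRAL" == x

theorem pvRank_mk : pvRank = PySem.Dict.mk
    [("DSL", 0), ("FORMING", 0), ("FORM", 0), ("FORMERS", 0), ("FORMER", 0),
     ("DL", 1), ("CUTTING", 1), ("CUT", 1), ("SL", 2), ("SPIRAL", 2)] := by decide

theorem pvRank_get (x : String) :
    PySem.Dict.get? pvRank x =
      if pvIsF x then some 0 else if pvIsC x then some 1 else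
        if pvIsS x then some 2 else none := by
  rw [pvRank_mk]
  simp only [PySem.Dict.get?_mk_cons, pvIsF, pvIsC, pvIsS]
  split_ifs <;> simp_all [PySem.Dict.get?]

theorem pvM_char (l : List String) :
    pvM l =
      if l.any pvIsF then some 0 else if l.any pvIsC then some 1 else
        if l.any pvIsS then some 2 else none := by
  induction l with
  | nil => rfl
  | cons x rest ih =>
    show pvMinO (PySem.Dict.get? pvRank x) (pvM rest) = _
    rw [ih, pvRank_get]
    simp only [List.any_cons]
    by_cases hf : pvIsF x = true <;> by_cases hc : pvIsC x = true <;>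
    by_cases hs : pvIsS x = true <;> by_cases hF : rest.any pvIsF = true <;>
    by_cases hC : rest.any pvIsC = true <;> by_cases hS : rest.any pvIsS = true <;>
      simp [hf, hc, hs, hF, hC, hS, pvMinO]

theorem pvInnerA_char (l : List String) (k : String) (v : List String) :
    pvInnerA l k v = if v.any (fun i => l.contains i) then some k else none := by
  induction v with
  | nil => rfl
  | cons i rest ih =>
    show (if l.contains i then some k else pvInnerA l k rest) = _
    rw [ih, List.any_cons]
    cases h : l.contains i <;> simp

theorem pvAny_beq (l : List String) (k : String) :
    (l.any fun x => k == x) = l.contains k := by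
  induction l with
  | nil => rfl
  | cons x rest ih => rw [List.any_cons, ih, List.contains_cons]

theorem pvAny_or {α : Type} (l : List α) (p q : α → Bool) :
    (l.any fun x => p x || q x) = (l.any p || l.any q) := by
  induction l with
  | nil => rfl
  | cons x rest ih =>
    cases hp : p x <;> cases hq : q x <;> simp [List.any_cons, hp, hq, ih]

theorem pvCatF (l : List String) :
    (["DSL", "FORMING", "FORM", "FORMERS", "FORMER"].any fun i => l.contains i) = l.any pvIsF := by
  rw [show l.any pvIsF = (l.any fun x => pvIsF x) from rfl]
  simp only [pvIsF, pvAny_or, pvAny_beq, List.any_cons, List.any_nil, Bool.or_false,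
    Bool.or_assoc]

theorem pvCatC (l : List String) :
    (["DL", "CUTTING", "CUT"].any fun i => l.contains i) = l.any pvIsC := by
  rw [show l.any pvIsC = (l.any fun x => pvIsC x) from rfl]
  simp only [pvIsC, pvAny_or, pvAny_beq, List.any_cons, List.any_nil, Bool.or_false,
    Bool.or_assoc]

theorem pvCatS (l : List String) :
    (["SL", "SPIRAL"].any fun i => l.contains i) = l.any pvIsS := by
  rw [show l.any pvIsS = (l.any fun x => pvIsS x) from rfl]
  simp only [pvIsS, pvAny_or, pvAny_beq, List.any_cons, List.any_nil, Bool.or_false,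
    Bool.or_assoc]

theorem pvMain (l : List String) :
    pvOuterA l pvTapTypes =
      (match pvBestB l none with
       | none => none
       | some r => PySem.List.pyGet? pvCats r) := by
  rw [pvBestB_eq_minO]
  have hB : pvMinO none (pvM l) = pvM l := by cases pvM l <;> rfl
  rw [hB, pvM_char]
  simp only [pvTapTypes, pvOuterA, pvInnerA_char, pvCatF, pvCatC, pvCatS]
  by_cases hF : l.any pvIsF = true <;> by_cases hC : l.any pvIsC = true <;>
  by_cases hS : l.any pvIsS = true <;>
    simp [hF, hC, hS, pvCats, PySem.List.pyGet?, PySem.List.pyIdx?]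

-- ===== VERDICT (by name: the statement is the Claim_ definition above) =====
theorem get_tap_type_spec : Claim_equal_get_tap_type := by
  intro s _
  show get_tap_type s = get_tap_type_alt s
  exact pvMain (s.map PySem.Str.upper)
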